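-- pv_equiv track=rewrite | github.com/djova/advent-of-code | 2021/python/22_Reactor_Reboot.py | remove_region_from_set
-- ===== SOURCE A (Python) =====
-- def dim_overlap(da, db):
--     a1, a2 = da
--     b1, b2 = db
--     if a1 <= b1 <= a2:
--         return b1, min(b2, a2)
--     if b1 <= a1 <= b2:
--         return a1, min(a2, b2)
--     return None
--
-- def split_overlap(da, db):
--     a1, a2 = da
--     b1, b2 = db
--     if b1 > a1:
--         yield a1, max(a1, b1 - 1)
--     yield b1, b2
--     if b2 < a2:
--         yield min(b2 + 1, a2), a2
--
-- def region_overlap(ra, rb):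
--     ol = [dim_overlap(da, db) for da, db in zip(ra, rb)]
--     return ol if all(ol) else None
--
-- def remove_region(orig, removal, axis=0):
--     if not region_overlap(orig, removal):
--         return [orig]
--     if axis > len(removal) - 1:
--         return []
--     result = []
--     od, rd = orig[axis], removal[axis]
--     for d_rem in split_overlap(od, rd):
--         n_region = orig[:]
--         n_region[axis] = d_rem
--         result.extend(remove_region(n_region, removal, axis + 1))
--     return result
--
-- def remove_region_from_set(regions, removal):
--     remainder = []
--     for r in regions:
--         ol = region_overlap(r, removal)
--         if not ol:
--             remainder.append(r)
--             continue
--         rem = remove_region(r, ol)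
--         remainder.extend(rem)
--     return remainder
-- ===== SOURCE B (Python) =====
-- def overlap_box(r, removal):
--     # per-dimension overlap of the two boxes (same clip rule as the task expects), or None
--     box = []
--     for (a1, a2), (b1, b2) in zip(r, removal):
--         if a1 <= b1 <= a2:
--             box.append((b1, min(b2, a2)))
--         elif b1 <= a1 <= b2:
--             box.append((a1, min(a2, b2)))
--         else:
--             return None
--     return box
--
--
-- def remove_region_from_set(regions, removal):
--     remainder = []
--     for r in regions:
--         ol = overlap_box(r, removal)
--         if not ol:
--             remainder.append(r)
--             continue
--         # iterative slab-peel: walk the axes once, emitting the 'before' slab,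
--         # stacking the 'after' slab, and narrowing the working box to the overlap
--         work = list(r)
--         afters = []
--         for axis, (lo, hi) in enumerate(ol):
--             a1, a2 = work[axis]
--             if lo > a1:
--                 before = list(work)
--                 before[axis] = (a1, lo - 1)
--                 remainder.append(before)
--             if hi < a2:
--                 after = list(work)
--                 after[axis] = (hi + 1, a2)
--                 afters.append(after)
--             work[axis] = (lo, hi)
--         remainder.extend(reversed(afters))
--     return remainder
-- ===== Notes on version B (the rewrite author's own statement) =====
-- stated objective: alternative
-- what changed: The per-axis recursive remove_region (which re-runs region_overlap at every recursion level) is replaced by a single iterative slab-peel over the axes: the overlap box is computed once, before-slabs are emitted in axis order, after-slabs are pushed on a stack and appended in reverse, and the interior core is discarded.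
-- outside the precondition, e.g. on remove_region_from_set([[(0, 10)]], [(5, 1)]): A returns [[(0, 4)], [(5, 1)]], B returns [[(0, 4)], [(2, 10)]]
import Mathlib
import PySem

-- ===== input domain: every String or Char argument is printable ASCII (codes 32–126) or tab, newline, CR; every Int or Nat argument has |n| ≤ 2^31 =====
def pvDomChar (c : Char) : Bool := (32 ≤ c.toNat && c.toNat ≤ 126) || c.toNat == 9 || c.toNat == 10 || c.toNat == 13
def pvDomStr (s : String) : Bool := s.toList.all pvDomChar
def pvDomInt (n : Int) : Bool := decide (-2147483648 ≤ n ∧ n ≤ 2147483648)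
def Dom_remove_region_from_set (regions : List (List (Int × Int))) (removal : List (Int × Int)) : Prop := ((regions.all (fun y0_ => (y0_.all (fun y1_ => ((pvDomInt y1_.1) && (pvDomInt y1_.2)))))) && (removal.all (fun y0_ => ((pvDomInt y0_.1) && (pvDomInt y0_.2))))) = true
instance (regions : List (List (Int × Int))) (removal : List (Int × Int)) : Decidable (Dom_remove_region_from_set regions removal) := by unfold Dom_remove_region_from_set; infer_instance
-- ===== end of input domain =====

-- B replaces the per-axis recursion of remove_region (which re-runs region_overlap at every
-- level) by one iterative slab-peel pass over the axes; same output list in the same order on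
-- every input admitted by Pre_ (objective: alternative).


-- ===== PORT A =====
def dim_overlap (da db : Int × Int) : Option (Int × Int) :=
  if da.1 ≤ db.1 ∧ db.1 ≤ da.2 then some (db.1, min db.2 da.2)
  else if db.1 ≤ da.1 ∧ da.1 ≤ db.2 then some (da.1, min da.2 db.2)
  else none

def split_overlap (da db : Int × Int) : List (Int × Int) :=
  (if db.1 > da.1 then [(da.1, max da.1 (db.1 - 1))] else []) ++
  [db] ++
  (if db.2 < da.2 then [(min (db.2 + 1) da.2, da.2)] else [])

def region_overlap (ra rb : List (Int × Int)) : Option (List (Int × Int)) :=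
  let ol := (List.zip ra rb).map (fun p => dim_overlap p.1 p.2)
  if ol.all Option.isSome then some (ol.map (fun o => o.getD (0, 0))) else none

-- Python truthiness of region_overlap's result ('if not …': None and the empty list are falsy)
def ro_truthy (o : Option (List (Int × Int))) : Bool :=
  match o with | none => false | some l => !l.isEmpty

def remove_region (orig removal : List (Int × Int)) (axis : Nat) : List (List (Int × Int)) :=
  if ro_truthy (region_overlap orig removal) = false then [orig]
  else if (removal.length : Int) - 1 < (axis : Int) then []
  else
    -- orig[axis] cannot raise here: remove_region is only invoked with removal no longer than orig,
    -- and axis ≤ len(removal)-1 was just checked, so the default of getD is never used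
    let od := orig.getD axis (0, 0)
    let rd := removal.getD axis (0, 0)
    (split_overlap od rd).foldl
      (fun acc d => acc ++ remove_region (orig.set axis d) removal (axis + 1)) []
termination_by removal.length - axis
decreasing_by omega

def remove_region_from_set (regions : List (List (Int × Int))) (removal : List (Int × Int)) : List (List (Int × Int)) :=
  regions.foldl (fun remainder r =>
    let ol := region_overlap r removal
    if ro_truthy ol = false then remainder ++ [r]
    else remainder ++ remove_region r (ol.getD []) 0) []

-- ===== PORT B =====
-- Source B's overlap_box: the per-dimension clipped overlap of the two boxes, or none
def pvOverlapBox : List ((Int × Int) × (Int × Int)) → Option (List (Int × Int))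
  | [] => some []
  | p :: rest =>
    if p.1.1 ≤ p.2.1 ∧ p.2.1 ≤ p.1.2 then
      (pvOverlapBox rest).map (fun l => (p.2.1, min p.2.2 p.1.2) :: l)
    else if p.2.1 ≤ p.1.1 ∧ p.1.1 ≤ p.2.2 then
      (pvOverlapBox rest).map (fun l => (p.1.1, min p.1.2 p.2.2) :: l)
    else none

-- loop body of Source B's 'for axis, (lo, hi) in enumerate(ol)': state = (remainder, afters, work)
def pvStepB (st : List (List (Int × Int)) × List (List (Int × Int)) × List (Int × Int))
    (e : Int × (Int × Int)) :
    List (List (Int × Int)) × List (List (Int × Int)) × List (Int × Int) :=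
  let axis := e.1.toNat
  let lo := e.2.1
  let hi := e.2.2
  let a1 := (st.2.2.getD axis (0, 0)).1
  let a2 := (st.2.2.getD axis (0, 0)).2
  let acc := if lo > a1 then st.1 ++ [st.2.2.set axis (a1, lo - 1)] else st.1
  let afters := if hi < a2 then st.2.1 ++ [st.2.2.set axis (hi + 1, a2)] else st.2.1
  (acc, afters, st.2.2.set axis (lo, hi))

def remove_region_from_set_alt (regions : List (List (Int × Int))) (removal : List (Int × Int)) : List (List (Int × Int)) :=
  regions.foldl (fun remainder r =>
    match pvOverlapBox (List.zip r removal) with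
    | none => remainder ++ [r]
    | some ol =>
      if ol.isEmpty then remainder ++ [r]
      else
        let st := (PySem.List.enumerate ol 0).foldl pvStepB (remainder, [], r)
        st.1 ++ st.2.1.reverse) []

-- ===== PRECONDITION & SPEC =====
-- per-dimension overlap test of A's dim_overlap, as a boundary relation on the input
def pvOverlap1 (p : (Int × Int) × (Int × Int)) : Bool :=
  (decide (p.1.1 ≤ p.2.1) && decide (p.2.1 ≤ p.1.2)) ||
  (decide (p.2.1 ≤ p.1.1) && decide (p.1.1 ≤ p.2.2))

-- the clipped overlap interval of this dimension is empty (hi < lo)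
def pvBad (p : (Int × Int) × (Int × Int)) : Bool :=
  if p.1.1 ≤ p.2.1 ∧ p.2.1 ≤ p.1.2 then decide (min p.2.2 p.1.2 < p.2.1)
  else decide (min p.1.2 p.2.2 < p.1.1)

-- Pre_ excludes inputs containing malformed hi < lo interval boxes that make some region's
-- clipped per-dimension overlap with the removal box empty: no box-subtraction semantics exists
-- there, and A's leftover pieces and B's slab pieces are two equally accidental answers.
def Pre_remove_region_from_set (regions : List (List (Int × Int))) (removal : List (Int × Int)) : Prop :=
  ∀ r ∈ regions, ¬ (List.zip r removal ≠ [] ∧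
    (∀ p ∈ List.zip r removal, pvOverlap1 p = true) ∧
    (∃ p ∈ List.zip r removal, pvBad p = true))
instance (regions : List (List (Int × Int))) (removal : List (Int × Int)) : Decidable (Pre_remove_region_from_set regions removal) := by unfold Pre_remove_region_from_set; infer_instance

def pvWitness_remove_region_from_set : (List (List (Int × Int))) × (List (Int × Int)) :=
  ([[(0, 10)], [(20, 30)]], [(2, 5)])

def Spec_remove_region_from_set (regions : List (List (Int × Int))) (removal : List (Int × Int)) (out : List (List (Int × Int))) : Prop := out = remove_region_from_set_alt regions removal
instance (regions : List (List (Int × Int))) (removal : List (Int × Int)) (out : List (List (Int × Int))) : Decidable (Spec_remove_region_from_set regions removal out) := by unfold Spec_remove_region_from_set; infer_instance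

-- ===== CLAIM (what is proved, stated in full; the proofs are below) =====
def Claim_equal_remove_region_from_set : Prop := ∀ (regions : List (List (Int × Int))) (removal : List (Int × Int)), Dom_remove_region_from_set regions removal → Pre_remove_region_from_set regions removal → Spec_remove_region_from_set regions removal (remove_region_from_set regions removal)

-- ===== LEMMAS AND PROOFS =====

-- the slab-peel result, as a recursive function over the remaining overlap dims
def pvPeel (work : List (Int × Int)) (tail : List (Int × Int)) (axis : Nat) : List (List (Int × Int)) :=
  match tail with
  | [] => []
  | (lo, hi) :: rest =>
    let a1 := (work.getD axis (0, 0)).1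
    let a2 := (work.getD axis (0, 0)).2
    (if lo > a1 then [work.set axis (a1, lo - 1)] else []) ++
    pvPeel (work.set axis (lo, hi)) rest (axis + 1) ++
    (if hi < a2 then [work.set axis (hi + 1, a2)] else [])

theorem pvLoopB_eq (tail : List (Int × Int)) : ∀ (s : Int), 0 ≤ s →
    ∀ (acc afters : List (List (Int × Int))) (work : List (Int × Int)),
    (((PySem.List.enumerate tail s).foldl pvStepB (acc, afters, work)).1 ++
      ((PySem.List.enumerate tail s).foldl pvStepB (acc, afters, work)).2.1.reverse)
      = acc ++ pvPeel work tail s.toNat ++ afters.reverse := by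
  induction tail with
  | nil => intro s hs acc afters work; simp [PySem.List.enumerate, pvPeel]
  | cons p rest ih =>
    intro s hs acc afters work
    obtain ⟨lo, hi⟩ := p
    rw [PySem.List.enumerate_cons, List.foldl_cons]
    have hs1 : (0:Int) ≤ s + 1 := by omega
    have ht : (s + 1).toNat = s.toNat + 1 := by omega
    show _ = acc ++ pvPeel work ((lo, hi) :: rest) s.toNat ++ afters.reverse
    rw [show pvStepB (acc, afters, work) (s, (lo, hi)) =
        ((if lo > (work.getD s.toNat (0,0)).1 then acc ++ [work.set s.toNat ((work.getD s.toNat (0,0)).1, lo - 1)] else acc),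
         (if hi < (work.getD s.toNat (0,0)).2 then afters ++ [work.set s.toNat (hi + 1, (work.getD s.toNat (0,0)).2)] else afters),
         work.set s.toNat (lo, hi)) from rfl]
    rw [ih (s+1) hs1, ht]
    rw [show pvPeel work ((lo, hi) :: rest) s.toNat =
        (if lo > (work.getD s.toNat (0,0)).1 then [work.set s.toNat ((work.getD s.toNat (0,0)).1, lo - 1)] else []) ++
        pvPeel (work.set s.toNat (lo, hi)) rest (s.toNat + 1) ++
        (if hi < (work.getD s.toNat (0,0)).2 then [work.set s.toNat (hi + 1, (work.getD s.toNat (0,0)).2)] else []) from rfl]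
    by_cases hb : (work[s.toNat]?.getD (0, 0)).1 < lo <;>
      by_cases ha : hi < (work[s.toNat]?.getD (0, 0)).2 <;>
      simp [List.getD_eq_getElem?_getD, hb, ha, List.reverse_append, List.append_assoc]

-- small facts about dim_overlap
theorem pvDim_sub (a1 a2 b1 b2 : Int) (h1 : a1 ≤ b1) (h2 : b2 ≤ a2) (h3 : b1 ≤ b2) :
    dim_overlap (a1, a2) (b1, b2) = some (b1, b2) := by
  unfold dim_overlap
  rw [if_pos ⟨h1, by omega⟩, min_eq_left h2]

theorem pvDim_none_left (a1 a2 b1 b2 : Int) (h0 : a1 ≤ a2) (h : a2 < b1) :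
    dim_overlap (a1, a2) (b1, b2) = none := by
  unfold dim_overlap
  rw [if_neg (by omega), if_neg (by omega)]

theorem pvDim_none_right (a1 a2 b1 b2 : Int) (h0 : b1 ≤ b2) (h : b2 < a1) :
    dim_overlap (a1, a2) (b1, b2) = none := by
  unfold dim_overlap
  rw [if_neg (by omega), if_neg (by omega)]

-- getD through set
theorem pvGetD_set_self (l : List (Int × Int)) (i : Nat) (v d : Int × Int) (h : i < l.length) :
    (l.set i v).getD i d = v := by
  simp [List.getD_eq_getElem?_getD, h]

theorem pvGetD_set_ne (l : List (Int × Int)) (i j : Nat) (v d : Int × Int) (h : i ≠ j) :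
    (l.set i v).getD j d = l.getD j d := by
  simp [List.getD_eq_getElem?_getD, List.getElem?_set_ne, h]

-- region_overlap truthiness from per-dimension facts
theorem pvRo_truthy_of (work ol : List (Int × Int)) (hne : ol ≠ []) (hlen : ol.length ≤ work.length)
    (h : ∀ i, i < ol.length → (dim_overlap (work.getD i (0, 0)) (ol.getD i (0, 0))).isSome) :
    ro_truthy (region_overlap work ol) = true := by
  unfold region_overlap ro_truthy
  have hz : (List.zip work ol).length = ol.length := by
    rw [List.length_zip]; omega
  have hall : ((List.zip work ol).map (fun p => dim_overlap p.1 p.2)).all Option.isSome = true := by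
    rw [List.all_eq_true]
    intro x hx
    obtain ⟨p, hp, rfl⟩ := List.mem_map.mp hx
    obtain ⟨i, hi, rfl⟩ := List.mem_iff_getElem.mp hp
    rw [List.getElem_zip]
    have hi' : i < ol.length := by omega
    have e1 : work[i] = work.getD i (0, 0) := (List.getD_eq_getElem work (0,0) (by omega)).symm
    have e2 : ol[i] = ol.getD i (0, 0) := (List.getD_eq_getElem ol (0,0) hi').symm
    rw [e1, e2]; exact h i hi'
  rw [if_pos hall]
  obtain ⟨o, ot, rfl⟩ : ∃ o ot, ol = o :: ot := by
    cases ol with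
    | nil => exact absurd rfl hne
    | cons a b => exact ⟨a, b, rfl⟩
  obtain ⟨w, wt, rfl⟩ : ∃ w wt, work = w :: wt := by
    cases work with
    | nil => simp at hlen
    | cons a b => exact ⟨a, b, rfl⟩
  simp only [List.zip_cons_cons, List.map_cons, List.isEmpty_cons, Bool.not_false]

theorem pvRo_falsy_of (work ol : List (Int × Int)) (i : Nat) (hi : i < ol.length)
    (hlen : ol.length ≤ work.length)
    (h : dim_overlap (work.getD i (0, 0)) (ol.getD i (0, 0)) = none) :
    ro_truthy (region_overlap work ol) = false := by
  unfold region_overlap ro_truthy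
  have hz : (List.zip work ol).length = ol.length := by
    rw [List.length_zip]; omega
  have hmem : (none : Option (Int × Int)) ∈ (List.zip work ol).map (fun p => dim_overlap p.1 p.2) := by
    rw [List.mem_map]
    refine ⟨(List.zip work ol)[i]'(by omega), List.getElem_mem _, ?_⟩
    rw [List.getElem_zip]
    have e1 : work[i] = work.getD i (0, 0) := (List.getD_eq_getElem work (0,0) (by omega)).symm
    have e2 : ol[i] = ol.getD i (0, 0) := (List.getD_eq_getElem ol (0,0) hi).symm
    rw [e1, e2]; exact h
  have hall : ((List.zip work ol).map (fun p => dim_overlap p.1 p.2)).all Option.isSome = false := by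
    rw [List.all_eq_false]
    exact ⟨none, hmem, by simp⟩
  simp [hall]

-- one step of A's recursion where the box no longer overlaps: it is kept whole
theorem pvRemove_keep (work ol : List (Int × Int)) (axis : Nat) (i : Nat) (hi : i < ol.length)
    (hlen : ol.length ≤ work.length)
    (h : dim_overlap (work.getD i (0, 0)) (ol.getD i (0, 0)) = none) :
    remove_region work ol axis = [work] := by
  rw [remove_region]
  rw [if_pos (pvRo_falsy_of work ol i hi hlen h)]

-- terminal step: all axes narrowed to the overlap, the core is dropped
theorem pvRemove_term (work ol : List (Int × Int)) (hne : ol ≠ [])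
    (hol : ∀ i, i < ol.length → (ol.getD i (0, 0)).1 ≤ (ol.getD i (0, 0)).2)
    (hlen : ol.length ≤ work.length)
    (hpre : ∀ i, i < ol.length → work.getD i (0, 0) = ol.getD i (0, 0)) :
    remove_region work ol ol.length = [] := by
  rw [remove_region]
  have htr : ro_truthy (region_overlap work ol) = true := by
    apply pvRo_truthy_of work ol hne hlen
    intro i hi
    rw [hpre i hi]
    rw [show ol.getD i (0,0) = ((ol.getD i (0,0)).1, (ol.getD i (0,0)).2) from rfl,
        pvDim_sub _ _ _ _ le_rfl le_rfl (hol i hi)]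
    rfl
  rw [if_neg (by simp [htr])]
  have hpos : 0 < ol.length := List.length_pos_of_ne_nil hne
  rw [if_pos (by omega)]

theorem pvRemoveA_eq (ol : List (Int × Int)) (hne : ol ≠ [])
    (hol : ∀ i, i < ol.length → (ol.getD i (0, 0)).1 ≤ (ol.getD i (0, 0)).2) :
    ∀ (k : Nat) (work : List (Int × Int)) (axis : Nat),
    ol.length - axis ≤ k →
    ol.length ≤ work.length →
    axis ≤ ol.length →
    (∀ i, i < axis → work.getD i (0, 0) = ol.getD i (0, 0)) →
    (∀ i, axis ≤ i → i < ol.length →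
      (work.getD i (0, 0)).1 ≤ (ol.getD i (0, 0)).1 ∧ (ol.getD i (0, 0)).2 ≤ (work.getD i (0, 0)).2) →
    remove_region work ol axis = pvPeel work (ol.drop axis) axis := by
  intro k
  induction k with
  | zero =>
    intro work axis hk hlen haxis hpre hsuf
    have hax : axis = ol.length := by omega
    subst hax
    rw [List.drop_length]
    exact pvRemove_term work ol hne hol hlen (fun i hi => hpre i hi)
  | succ k ih =>
    intro work axis hk hlen haxis hpre hsuf
    by_cases hlt : axis < ol.length
    · -- body case
      have hwa : axis < work.length := by omega
      have hb1 : (work.getD axis (0,0)).1 ≤ (ol.getD axis (0,0)).1 := (hsuf axis le_rfl hlt).1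
      have hb2 : (ol.getD axis (0,0)).2 ≤ (work.getD axis (0,0)).2 := (hsuf axis le_rfl hlt).2
      have hlh : (ol.getD axis (0,0)).1 ≤ (ol.getD axis (0,0)).2 := hol axis hlt
      have htr : ro_truthy (region_overlap work ol) = true := by
        apply pvRo_truthy_of work ol hne hlen
        intro i hi
        by_cases hia : i < axis
        · rw [hpre i hia,
            show ol.getD i (0,0) = ((ol.getD i (0,0)).1, (ol.getD i (0,0)).2) from rfl,
            pvDim_sub _ _ _ _ le_rfl le_rfl (hol i hi)]
          rfl
        · have hge : axis ≤ i := by omega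
          rw [show work.getD i (0,0) = ((work.getD i (0,0)).1, (work.getD i (0,0)).2) from rfl,
            show ol.getD i (0,0) = ((ol.getD i (0,0)).1, (ol.getD i (0,0)).2) from rfl,
            pvDim_sub _ _ _ _ (hsuf i hge hi).1 (hsuf i hge hi).2 (hol i hi)]
          rfl
      rw [remove_region, if_neg (by simp [htr]), if_neg (by omega)]
      dsimp only
      -- the three recursive calls
      have hmid : remove_region (work.set axis (ol.getD axis (0,0))) ol (axis + 1)
          = pvPeel (work.set axis (ol.getD axis (0,0))) (ol.drop (axis + 1)) (axis + 1) := by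
        apply ih
        · omega
        · simpa using hlen
        · omega
        · intro i hi
          by_cases hia : i = axis
          · subst hia; rw [pvGetD_set_self _ _ _ _ hwa]
          · rw [pvGetD_set_ne _ _ _ _ _ (fun h => hia h.symm)]
            exact hpre i (by omega)
        · intro i hge hi
          rw [pvGetD_set_ne _ _ _ _ _ (by omega)]
          exact hsuf i (by omega) hi
      have hbef : ∀ hb : (work.getD axis (0,0)).1 < (ol.getD axis (0,0)).1,
          remove_region (work.set axis ((work.getD axis (0,0)).1, (ol.getD axis (0,0)).1 - 1)) ol (axis + 1)
          = [work.set axis ((work.getD axis (0,0)).1, (ol.getD axis (0,0)).1 - 1)] := by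
        intro hb
        apply pvRemove_keep _ _ _ axis hlt (by simpa using hlen)
        rw [pvGetD_set_self _ _ _ _ hwa,
          show ol.getD axis (0,0) = ((ol.getD axis (0,0)).1, (ol.getD axis (0,0)).2) from rfl]
        exact pvDim_none_left _ _ _ _ (by omega) (by omega)
      have haft : ∀ ha : (ol.getD axis (0,0)).2 < (work.getD axis (0,0)).2,
          remove_region (work.set axis ((ol.getD axis (0,0)).2 + 1, (work.getD axis (0,0)).2)) ol (axis + 1)
          = [work.set axis ((ol.getD axis (0,0)).2 + 1, (work.getD axis (0,0)).2)] := by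
        intro ha
        apply pvRemove_keep _ _ _ axis hlt (by simpa using hlen)
        rw [pvGetD_set_self _ _ _ _ hwa,
          show ol.getD axis (0,0) = ((ol.getD axis (0,0)).1, (ol.getD axis (0,0)).2) from rfl]
        exact pvDim_none_right _ _ _ _ hlh (by omega)
      -- unfold the RHS peel one step
      have hdrop : ol.drop axis = ol.getD axis (0,0) :: ol.drop (axis + 1) := by
        rw [List.getD_eq_getElem ol (0,0) hlt, List.getElem_cons_drop]
      rw [hdrop]
      rw [show pvPeel work (ol.getD axis (0,0) :: ol.drop (axis + 1)) axis =
          (if (ol.getD axis (0,0)).1 > (work.getD axis (0,0)).1 then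
            [work.set axis ((work.getD axis (0,0)).1, (ol.getD axis (0,0)).1 - 1)] else []) ++
          pvPeel (work.set axis ((ol.getD axis (0,0)).1, (ol.getD axis (0,0)).2)) (ol.drop (axis + 1)) (axis + 1) ++
          (if (ol.getD axis (0,0)).2 < (work.getD axis (0,0)).2 then
            [work.set axis ((ol.getD axis (0,0)).2 + 1, (work.getD axis (0,0)).2)] else []) from rfl]
      unfold split_overlap
      by_cases hb : (work.getD axis (0,0)).1 < (ol.getD axis (0,0)).1 <;>
        by_cases ha : (ol.getD axis (0,0)).2 < (work.getD axis (0,0)).2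
      · rw [if_pos (by omega), if_pos (by omega), if_pos (by omega), if_pos (by omega)]
        simp only [List.nil_append, List.cons_append, List.foldl_cons, List.foldl_nil]
        rw [show max (work.getD axis (0,0)).1 ((ol.getD axis (0,0)).1 - 1) = (ol.getD axis (0,0)).1 - 1 from by omega,
            show min ((ol.getD axis (0,0)).2 + 1) (work.getD axis (0,0)).2 = (ol.getD axis (0,0)).2 + 1 from by omega]
        rw [hbef hb, haft ha,
          show (ol.getD axis (0,0)) = ((ol.getD axis (0,0)).1, (ol.getD axis (0,0)).2) from rfl] at *
        rw [hmid]
        simp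
      · rw [if_pos (by omega), if_neg (by omega), if_pos (by omega), if_neg (by omega)]
        simp only [List.nil_append, List.cons_append, List.append_nil, List.foldl_cons, List.foldl_nil]
        rw [show max (work.getD axis (0,0)).1 ((ol.getD axis (0,0)).1 - 1) = (ol.getD axis (0,0)).1 - 1 from by omega]
        rw [hbef hb,
          show (ol.getD axis (0,0)) = ((ol.getD axis (0,0)).1, (ol.getD axis (0,0)).2) from rfl] at *
        rw [hmid]
        simp
      · rw [if_neg (by omega), if_pos (by omega), if_neg (by omega), if_pos (by omega)]
        simp only [List.nil_append, List.cons_append, List.foldl_cons, List.foldl_nil]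
        rw [show min ((ol.getD axis (0,0)).2 + 1) (work.getD axis (0,0)).2 = (ol.getD axis (0,0)).2 + 1 from by omega]
        rw [haft ha,
          show (ol.getD axis (0,0)) = ((ol.getD axis (0,0)).1, (ol.getD axis (0,0)).2) from rfl] at *
        simp only [Prod.mk.eta]
        rw [hmid]
      · rw [if_neg (by omega), if_neg (by omega), if_neg (by omega), if_neg (by omega)]
        simp only [List.nil_append, List.append_nil, List.foldl_cons, List.foldl_nil]
        rw [show (ol.getD axis (0,0)) = ((ol.getD axis (0,0)).1, (ol.getD axis (0,0)).2) from rfl] at *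
        simp only [Prod.mk.eta]
        rw [hmid]
    · have hax : axis = ol.length := by omega
      subst hax
      rw [List.drop_length]
      exact pvRemove_term work ol hne hol hlen (fun i hi => hpre i hi)

-- Source B's overlap_box computes exactly region_overlap's result
theorem pvOverlapBox_eq (zs : List ((Int × Int) × (Int × Int))) :
    pvOverlapBox zs =
      (if (zs.map (fun p => dim_overlap p.1 p.2)).all Option.isSome then
        some ((zs.map (fun p => dim_overlap p.1 p.2)).map (fun o => o.getD (0, 0)))
      else none) := by
  induction zs with
  | nil => simp [pvOverlapBox]
  | cons p t ih =>
    unfold pvOverlapBox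
    rw [ih, List.map_cons, List.all_cons,
      show dim_overlap p.1 p.2 =
        (if p.1.1 ≤ p.2.1 ∧ p.2.1 ≤ p.1.2 then some (p.2.1, min p.2.2 p.1.2)
         else if p.2.1 ≤ p.1.1 ∧ p.1.1 ≤ p.2.2 then some (p.1.1, min p.1.2 p.2.2)
         else none) from rfl]
    by_cases c1 : p.1.1 ≤ p.2.1 ∧ p.2.1 ≤ p.1.2 <;>
      by_cases c2 : p.2.1 ≤ p.1.1 ∧ p.1.1 ≤ p.2.2 <;>
      by_cases ca : (t.map (fun p => dim_overlap p.1 p.2)).all Option.isSome <;>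
      simp [c1, c2, ca]

theorem pvRegion_eq_overlapBox (ra rb : List (Int × Int)) :
    region_overlap ra rb = pvOverlapBox (List.zip ra rb) := by
  unfold region_overlap
  rw [pvOverlapBox_eq]

-- structure of one successful overlap_box step
theorem pvOB_cons (p : (Int × Int) × (Int × Int)) (t : List ((Int × Int) × (Int × Int)))
    (ol : List (Int × Int)) (h : pvOverlapBox (p :: t) = some ol) :
    ∃ v l, pvOverlapBox t = some l ∧ ol = v :: l ∧
      ((p.1.1 ≤ p.2.1 ∧ p.2.1 ≤ p.1.2 ∧ v = (p.2.1, min p.2.2 p.1.2)) ∨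
       (¬(p.1.1 ≤ p.2.1 ∧ p.2.1 ≤ p.1.2) ∧ p.2.1 ≤ p.1.1 ∧ p.1.1 ≤ p.2.2 ∧
        v = (p.1.1, min p.1.2 p.2.2))) := by
  unfold pvOverlapBox at h
  split_ifs at h with c1 c2
  · obtain ⟨l, hl, rfl⟩ := Option.map_eq_some_iff.mp h
    exact ⟨_, l, hl, rfl, Or.inl ⟨c1.1, c1.2, rfl⟩⟩
  · obtain ⟨l, hl, rfl⟩ := Option.map_eq_some_iff.mp h
    exact ⟨_, l, hl, rfl, Or.inr ⟨c1, c2.1, c2.2, rfl⟩⟩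

theorem pvOB_length (zs : List ((Int × Int) × (Int × Int))) :
    ∀ ol, pvOverlapBox zs = some ol → ol.length = zs.length := by
  induction zs with
  | nil => intro ol h; simp [pvOverlapBox] at h; simp [← h]
  | cons p t ih =>
    intro ol h
    obtain ⟨v, l, hl, rfl, _⟩ := pvOB_cons p t ol h
    simp [ih l hl]

theorem pvOB_overlap1 (zs : List ((Int × Int) × (Int × Int))) :
    ∀ ol, pvOverlapBox zs = some ol → ∀ p ∈ zs, pvOverlap1 p = true := by
  induction zs with
  | nil => intro ol _ p hp; simp at hp
  | cons q t ih =>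
    intro ol h p hp
    obtain ⟨v, l, hl, rfl, hc⟩ := pvOB_cons q t ol h
    rcases List.mem_cons.mp hp with rfl | hp'
    · unfold pvOverlap1
      rcases hc with ⟨h1, h2, _⟩ | ⟨_, h1, h2, _⟩ <;> simp [h1, h2]
    · exact ih l hl p hp'

theorem pvOB_bounds (zs : List ((Int × Int) × (Int × Int))) :
    ∀ ol, pvOverlapBox zs = some ol → ∀ i, (hi : i < zs.length) →
      (zs[i].1.1 ≤ (ol.getD i (0, 0)).1 ∧ (ol.getD i (0, 0)).2 ≤ zs[i].1.2) := by
  induction zs with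
  | nil => intro ol _ i hi; simp at hi
  | cons q t ih =>
    intro ol h i hi
    obtain ⟨v, l, hl, rfl, hc⟩ := pvOB_cons q t ol h
    cases i with
    | zero =>
      simp only [List.getElem_cons_zero, List.getD_cons_zero]
      rcases hc with ⟨h1, h2, rfl⟩ | ⟨_, h1, h2, rfl⟩ <;> exact ⟨by omega, by omega⟩
    | succ i =>
      simp only [List.getElem_cons_succ, List.getD_cons_succ]
      exact ih l hl i (by simpa using hi)

theorem pvOB_bad (zs : List ((Int × Int) × (Int × Int))) :
    ∀ ol, pvOverlapBox zs = some ol → ∀ i, (hi : i < zs.length) →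
      (pvBad zs[i] = true ↔ (ol.getD i (0, 0)).2 < (ol.getD i (0, 0)).1) := by
  induction zs with
  | nil => intro ol _ i hi; simp at hi
  | cons q t ih =>
    intro ol h i hi
    obtain ⟨v, l, hl, rfl, hc⟩ := pvOB_cons q t ol h
    cases i with
    | zero =>
      simp only [List.getElem_cons_zero, List.getD_cons_zero]
      unfold pvBad
      rcases hc with ⟨h1, h2, rfl⟩ | ⟨hn, h1, h2, rfl⟩
      · rw [if_pos ⟨h1, h2⟩]; simp
      · rw [if_neg hn]; simp
    | succ i =>
      simp only [List.getElem_cons_succ, List.getD_cons_succ]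
      exact ih l hl i (by simpa using hi)

-- ===== VERDICT (by name: the statement is the Claim_ definition above) =====
theorem remove_region_from_set_spec : Claim_equal_remove_region_from_set := by
  intro regions removal hdom hpre
  unfold Pre_remove_region_from_set at hpre
  unfold Spec_remove_region_from_set remove_region_from_set remove_region_from_set_alt
  apply PySem.List.foldl_congr_mem
  intro acc r hrmem
  dsimp only
  rw [pvRegion_eq_overlapBox r removal]
  have hDr : ¬(List.zip r removal ≠ [] ∧ (∀ p ∈ List.zip r removal, pvOverlap1 p = true) ∧
      (∃ p ∈ List.zip r removal, pvBad p = true)) := hpre r hrmem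
  cases hOB : pvOverlapBox (List.zip r removal) with
  | none => simp [ro_truthy]
  | some ol =>
    by_cases he : ol = []
    · subst he; simp [ro_truthy]
    · have hlen0 : ol.length = (List.zip r removal).length := pvOB_length _ ol hOB
      have hzne : List.zip r removal ≠ [] := by
        intro hz
        apply he
        rw [hz] at hlen0
        simpa using List.eq_nil_of_length_eq_zero (by simpa using hlen0)
      have hnobad : ¬(∃ p ∈ List.zip r removal, pvBad p = true) :=
        fun hb => hDr ⟨hzne, pvOB_overlap1 _ ol hOB, hb⟩
      have hzlen : ol.length ≤ r.length := by
        rw [hlen0, List.length_zip]; omega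
      have hol' : ∀ i, i < ol.length → (ol.getD i (0,0)).1 ≤ (ol.getD i (0,0)).2 := by
        intro i hi
        by_contra hcon
        apply hnobad
        have hiz : i < (List.zip r removal).length := by omega
        exact ⟨_, List.getElem_mem hiz, (pvOB_bad _ ol hOB i hiz).mpr (by omega)⟩
      have hsuf' : ∀ i, 0 ≤ i → i < ol.length →
          (r.getD i (0,0)).1 ≤ (ol.getD i (0,0)).1 ∧ (ol.getD i (0,0)).2 ≤ (r.getD i (0,0)).2 := by
        intro i _ hi
        have hiz : i < (List.zip r removal).length := by omega
        have hir : i < r.length := by rw [List.length_zip] at hiz; omega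
        have hb := pvOB_bounds _ ol hOB i hiz
        rw [List.getElem_zip] at hb
        rw [List.getD_eq_getElem _ _ hir]
        exact hb
      have htr : ro_truthy (some ol) = true := by
        simp [ro_truthy, he]
      have hmain := pvRemoveA_eq ol he hol' ol.length r 0 (by omega) hzlen (by omega)
        (by omega) hsuf'
      rw [if_neg (by simp [htr]), Option.getD_some, hmain, List.drop_zero]
      show acc ++ pvPeel r ol 0 =
        (if ol.isEmpty = true then acc ++ [r]
         else (List.foldl pvStepB (acc, [], r) (PySem.List.enumerate ol)).1 ++
           (List.foldl pvStepB (acc, [], r) (PySem.List.enumerate ol)).2.1.reverse)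
      rw [if_neg (by simp [List.isEmpty_iff, he])]
      rw [pvLoopB_eq _ 0 le_rfl acc [] r]
      simp
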